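-- pv_equiv track=rewrite | github.com/Jahid11186/bizdata-task | ageCalculation.py | input_collector
-- ===== SOURCE A (Python) =====
-- def input_collector(date):
--     data = []
--     flag = []
--     shift = 0
--     for i in range(len(date)):
--         if date[i] == '-':
--             flag.append(i)
--
--     flag.append(-1)
--
--     for item in flag:
--         if item == -1:
--             data.append(date[shift:])
--         else:
--             data.append(date[shift:item])
--             shift = item + 1
--     return data
-- ===== SOURCE B (Python) =====
-- def input_collector(date):
--     result = []
--     current = ''
--     for ch in date:
--         if ch == '-':
--             result.append(current)
--             current = ''
--         else:
--             current += ch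
--     result.append(current)
--     return result
-- ===== Notes on version B (the rewrite author's own statement) =====
-- stated objective: simpler
-- what changed: Replaced A's two-phase strategy (collect all hyphen indices into a flag list with a -1 sentinel, then slice the string between consecutive indices with a shift variable) by a single streaming character scan that accumulates the current token and flushes it at each hyphen.
import Mathlib
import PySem

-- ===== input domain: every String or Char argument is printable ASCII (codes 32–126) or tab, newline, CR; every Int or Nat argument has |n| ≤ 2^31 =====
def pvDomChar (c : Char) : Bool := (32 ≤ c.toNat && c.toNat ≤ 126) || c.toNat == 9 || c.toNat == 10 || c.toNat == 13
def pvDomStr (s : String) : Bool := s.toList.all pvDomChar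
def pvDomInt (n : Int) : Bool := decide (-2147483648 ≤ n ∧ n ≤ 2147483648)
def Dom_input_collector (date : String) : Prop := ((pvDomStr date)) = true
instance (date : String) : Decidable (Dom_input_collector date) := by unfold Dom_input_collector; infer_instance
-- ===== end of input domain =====

-- B replaces A's two-phase "collect hyphen indices, then slice between them" with one
-- streaming scan that accumulates the current token; same return value on every input.

-- ===== PORT A =====
-- step of A's second loop: for item in flag: append the slice, update shift
def pvStepA (date : String) (st : List String × Int) (item : Int) : List String × Int :=
  if item = -1 then (st.1 ++ [PySem.Str.slice date (some st.2) none], st.2)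
  else (st.1 ++ [PySem.Str.slice date (some st.2) (some item)], item + 1)

def input_collector (date : String) : List String :=
  let flag : List Int :=
    (PySem.List.pyRange 0 (date.toList.length : Int)).foldl
      (fun f i => if PySem.List.pyGet? date.toList i == some '-' then f ++ [i] else f) []
  let flag := flag ++ [(-1 : Int)]
  (flag.foldl (pvStepA date) ([], 0)).1

-- ===== PORT B =====
-- step of B's single scan: flush current token at '-', otherwise extend it
def pvStepB (st : List String × String) (ch : Char) : List String × String :=
  if ch = '-' then (st.1 ++ [st.2], "") else (st.1, st.2.push ch)

def input_collector_alt (date : String) : List String :=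
  let r := date.toList.foldl pvStepB ([], "")
  r.1 ++ [r.2]

-- ===== PRECONDITION & SPEC =====
def Spec_input_collector (date : String) (out : List String) : Prop := out = input_collector_alt date
instance (date : String) (out : List String) : Decidable (Spec_input_collector date out) := by unfold Spec_input_collector; infer_instance

-- ===== CLAIM (what is proved, stated in full; the proofs are below) =====
def Claim_equal_input_collector : Prop := ∀ (date : String), Dom_input_collector date → Spec_input_collector date (input_collector date)

-- ===== LEMMAS AND PROOFS =====

theorem pvModifyHead_id {α : Type} (l : List α) : List.modifyHead (fun h => h) l = l := by
  cases l <;> simp [List.modifyHead]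

-- reference splitter: what both programs compute, on the char-list side
def pvSplit : List Char → List (List Char)
  | [] => [[]]
  | c :: t => if c = '-' then [] :: pvSplit t else List.modifyHead (fun h => c :: h) (pvSplit t)

-- hyphen positions, front-recursively
def pvHIdx : List Char → List Nat
  | [] => []
  | c :: t => (if c = '-' then [0] else []) ++ (pvHIdx t).map (· + 1)

-- B's scan computes pvSplit
theorem pvB_loop (cs : List Char) (res : List String) (cur : String) :
    (cs.foldl pvStepB (res, cur)).1 ++ [(cs.foldl pvStepB (res, cur)).2]
      = res ++ ((pvSplit cs).modifyHead (fun h => cur.toList ++ h)).map String.ofList := by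
  induction cs generalizing res cur with
  | nil => simp [pvSplit, String.ofList_toList]
  | cons c t ih =>
    simp only [List.foldl_cons, pvStepB]
    by_cases hc : c = '-'
    · simp only [hc]
      rw [ih]
      simp [pvSplit, String.ofList_toList, pvModifyHead_id]
    · rw [if_neg hc, ih]
      simp only [pvSplit, if_neg hc, List.modifyHead_modifyHead]
      have he : (fun h => (cur.push c).toList ++ h) = ((fun h => cur.toList ++ h) ∘ fun h => c :: h) := by
        funext h; simp [String.toList_push]
      rw [he]

theorem pvAlt_eq (date : String) :
    input_collector_alt date = (pvSplit date.toList).map String.ofList := by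
  unfold input_collector_alt
  have h := pvB_loop date.toList [] ""
  simpa [pvModifyHead_id] using h

-- A's first loop computes the hyphen positions
theorem pvHIdx_eq_filter (cs : List Char) :
    (List.range cs.length).filter (fun k => cs[k]? == some '-') = pvHIdx cs := by
  induction cs with
  | nil => simp [pvHIdx]
  | cons c t ih =>
    have hsucc : Nat.succ = fun x => x + 1 := funext fun x => rfl
    by_cases hc : c = '-'
    · subst hc
      have hp : ((fun k => (('-' :: t)[k]? == some '-')) ∘ fun x => x + 1) = fun k => (t[k]? == some '-') := by
        funext k; simp
      simp [List.range_succ_eq_map, List.filter_map, hsucc, hp, ih, pvHIdx]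
    · have hp : ((fun k => ((c :: t)[k]? == some '-')) ∘ fun x => x + 1) = fun k => (t[k]? == some '-') := by
        funext k; simp
      simp [List.range_succ_eq_map, List.filter_map, hsucc, hp, ih, pvHIdx, hc]

theorem pvFlag_eq (date : String) :
    (PySem.List.pyRange 0 (date.toList.length : Int)).foldl
      (fun f i => if PySem.List.pyGet? date.toList i == some '-' then f ++ [i] else f) []
      = (pvHIdx date.toList).map (fun (k : Nat) => (k : Int)) := by
  rw [PySem.List.pyRange_zero_natCast, List.foldl_map,
    PySem.List.foldl_append_if (fun (k : Nat) => PySem.List.pyGet? date.toList (k : Int) == some '-')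
      (fun (k : Nat) => (k : Int))]
  have : (fun (k : Nat) => PySem.List.pyGet? date.toList (k : Int) == some '-')
      = fun k => (date.toList[k]? == some '-') := by
    funext k; rw [PySem.List.pyGet?_natCast]
  rw [this, pvHIdx_eq_filter]
  exact List.nil_append _

-- hyphen-position structure: first position splits off the first token
theorem pvHIdx_cons (cs : List Char) (k : Nat) (rest : List Nat)
    (h : pvHIdx cs = k :: rest) :
    pvSplit cs = cs.take k :: pvSplit (cs.drop (k + 1))
      ∧ rest = (pvHIdx (cs.drop (k + 1))).map (· + (k + 1)) := by
  induction cs generalizing k rest with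
  | nil => simp [pvHIdx] at h
  | cons c t ih =>
    by_cases hc : c = '-'
    · subst hc
      simp only [pvHIdx] at h
      injection h with hk hr
      subst hk
      refine ⟨by simp [pvSplit], ?_⟩
      simpa using hr.symm
    · simp only [pvHIdx, if_neg hc, List.nil_append] at h
      rw [List.map_eq_cons_iff] at h
      obtain ⟨k', rest', hT, hk, hr⟩ := h
      obtain ⟨hs, hrest⟩ := ih k' rest' hT
      subst hk
      constructor
      · simp only [pvSplit, if_neg hc, hs, List.modifyHead_cons, List.take_succ_cons,
          List.drop_succ_cons]
      · rw [← hr, hrest, List.map_map]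
        simp only [List.drop_succ_cons]
        rfl

theorem pvHIdx_nil (cs : List Char) (h : pvHIdx cs = []) : pvSplit cs = [cs] := by
  induction cs with
  | nil => simp [pvSplit]
  | cons c t ih =>
    by_cases hc : c = '-'
    · simp [pvHIdx, hc] at h
    · simp only [pvHIdx, if_neg hc, List.nil_append, List.map_eq_nil_iff] at h
      simp [pvSplit, hc, ih h]

-- A's second loop on an exhausted flag list: the trailing -1 emits the final suffix
theorem pvA_base (date : String) (ts : List Char) (s : Nat) (res : List String)
    (hd : date.toList.drop s = ts) (h : pvHIdx ts = []) :
    (([(-1 : Int)]).foldl (pvStepA date) (res, (s : Int))).1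
      = res ++ (pvSplit ts).map String.ofList := by
  simp only [List.foldl_cons, List.foldl_nil, pvStepA]
  rw [pvHIdx_nil ts h]
  have hs : PySem.Str.slice date (some (s : Int)) none = String.ofList ts := by
    apply String.toList_inj.mp
    rw [PySem.Str.toList_slice, String.toList_ofList]
    show PySem.List.slice date.toList (some ((s : Nat) : Int)) none = ts
    rw [PySem.List.slice_from_natCast, hd]
  simp [hs]

-- A's second loop, run from shift s on the suffix ts, produces pvSplit ts
theorem pvA_loop (n : Nat) : ∀ (ts : List Char) (date : String) (s : Nat) (res : List String),
    ts.length ≤ n → date.toList.drop s = ts →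
    ((((pvHIdx ts).map (fun k => ((k + s : Nat) : Int))) ++ [(-1 : Int)]).foldl
        (pvStepA date) (res, (s : Int))).1
      = res ++ (pvSplit ts).map String.ofList := by
  induction n with
  | zero =>
    intro ts date s res hlen hd
    have hts : ts = [] := List.eq_nil_of_length_eq_zero (Nat.le_zero.mp hlen)
    subst hts
    simpa using pvA_base date [] s res hd rfl
  | succ n ih =>
    intro ts date s res hlen hd
    cases hH : pvHIdx ts with
    | nil =>
      simpa using pvA_base date ts s res hd hH
    | cons k rest =>
      obtain ⟨hsplit, hrest⟩ := pvHIdx_cons ts k rest hH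
      simp only [List.map_cons, List.cons_append, List.foldl_cons]
      have hne : ¬ (((k + s : Nat) : Int) = -1) := by
        have := Int.natCast_nonneg (k + s); omega
      have hsl : PySem.Str.slice date (some (s : Int)) (some ((k + s : Nat) : Int))
          = String.ofList (ts.take k) := by
        apply String.toList_inj.mp
        rw [PySem.Str.toList_slice, String.toList_ofList]
        show PySem.List.slice date.toList (some ((s : Nat) : Int)) (some ((k + s : Nat) : Int))
          = ts.take k
        rw [PySem.List.slice_natCast, hd]
        congr 1
        omega
      have hsh : ((k + s : Nat) : Int) + 1 = ((s + k + 1 : Nat) : Int) := by push_cast; ring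
      have hmap : rest.map (fun j => ((j + s : Nat) : Int))
          = (pvHIdx (ts.drop (k + 1))).map (fun j => ((j + (s + k + 1) : Nat) : Int)) := by
        rw [hrest, List.map_map]
        congr 1
        funext j
        simp only [Function.comp_apply]
        congr 1
        omega
      have hdd : date.toList.drop (s + k + 1) = ts.drop (k + 1) := by
        rw [← hd, List.drop_drop]
        have e : s + (k + 1) = s + k + 1 := by omega
        rw [e]
      have hlen' : (ts.drop (k + 1)).length ≤ n := by
        have h1 : ts ≠ [] := by intro e; subst e; simp [pvHIdx] at hH
        have h2 : 1 ≤ ts.length := List.length_pos_of_ne_nil h1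
        simp only [List.length_drop]
        omega
      simp only [pvStepA, if_neg hne, hsl, hsh, hmap]
      rw [ih (ts.drop (k + 1)) date (s + k + 1) (res ++ [String.ofList (ts.take k)]) hlen' hdd]
      rw [hsplit]
      simp

-- ===== VERDICT (by name: the statement is the Claim_ definition above) =====
theorem input_collector_spec : Claim_equal_input_collector := by
  intro date _
  unfold Spec_input_collector
  simp only [input_collector, pvFlag_eq, pvAlt_eq]
  have h := pvA_loop date.toList.length date.toList date 0 [] le_rfl (List.drop_zero)
  simp only [Nat.add_zero, Nat.cast_zero, List.nil_append] at h
  exact h
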